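-- pv_equiv track=rewrite | github.com/skLOks/Lab2 | main.py | temp_cat
-- ===== SOURCE A (Python) =====
-- a = [[-20, 0], [0, 15], [15, 25]] # массив для распределения разброса категорий
--
-- def temp_cat(temp):
--     # блок условий
--     if temp < -20:
--         return 0
--     if temp >= 25:
--         return 4
--     else:
--         # цикл для сравнения с категорией
--         for i in range(0, len(a)):
--             if temp >= a[i][0] and temp < a[i][1]:
--                 return i + 1
-- ===== SOURCE B (Python) =====
-- def temp_cat(temp):
--     # binary search (bisect_right) over the flat boundary list
--     boundaries = [-20, 0, 15, 25]
--     lo, hi = 0, len(boundaries)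
--     while lo < hi:
--         mid = (lo + hi) // 2
--         if temp < boundaries[mid]:
--             hi = mid
--         else:
--             lo = mid + 1
--     return lo
-- ===== Notes on version B (the rewrite author's own statement) =====
-- stated objective: alternative
-- what changed: Replaced the guard-plus-linear scan over [low,high] interval pairs by a single bisect_right-style binary search over the flat boundary list [-20, 0, 15, 25].
import Mathlib
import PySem

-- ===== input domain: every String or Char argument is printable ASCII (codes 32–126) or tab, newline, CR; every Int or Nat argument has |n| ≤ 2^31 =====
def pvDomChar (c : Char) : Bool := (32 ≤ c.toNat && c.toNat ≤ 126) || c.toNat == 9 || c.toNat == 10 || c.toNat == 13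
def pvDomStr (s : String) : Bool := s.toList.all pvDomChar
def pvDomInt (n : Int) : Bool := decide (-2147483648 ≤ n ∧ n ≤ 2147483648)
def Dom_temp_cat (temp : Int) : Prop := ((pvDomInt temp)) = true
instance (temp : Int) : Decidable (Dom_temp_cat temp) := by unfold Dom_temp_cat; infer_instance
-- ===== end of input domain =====

-- B replaces A's guard-plus-linear scan over [low,high] pairs by a bisect_right-style binary search over the flat boundary list (alternative algorithm, same result).


-- ===== PORT A =====
-- global table a = [[-20,0],[0,15],[15,25]]
def pvA : List (List Int) := [[-20, 0], [0, 15], [15, 25]]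
-- the for-loop over range(0, len(a)); returns none on fall-through (Python None, unreachable here)
def tcLoop (temp : Int) : List Nat → Option Int
  | [] => none
  | i :: rest =>
      if temp ≥ ((pvA.getD i []).getD 0 0) ∧ temp < ((pvA.getD i []).getD 1 0) then
        some ((i : Int) + 1)
      else tcLoop temp rest

def temp_cat (temp : Int) : Int :=
  if temp < -20 then 0
  else if temp ≥ 25 then 4
  else (tcLoop temp (List.range pvA.length)).getD 0  -- fall-through unreachable for integer temp

-- ===== PORT B =====
def pvBoundaries : List Int := [-20, 0, 15, 25]
-- bisect_right-style binary search
def bisectRight (xs : List Int) (x : Int) (lo hi : Nat) : Nat :=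
  if _h : lo < hi then
    let mid := (lo + hi) / 2
    if x < xs.getD mid 0 then bisectRight xs x lo mid
    else bisectRight xs x (mid + 1) hi
  else lo
termination_by hi - lo

def temp_cat_alt (temp : Int) : Int :=
  (bisectRight pvBoundaries temp 0 pvBoundaries.length : Nat)

-- ===== PRECONDITION & SPEC =====
def Spec_temp_cat (temp : Int) (out : Int) : Prop := out = temp_cat_alt temp
instance (temp : Int) (out : Int) : Decidable (Spec_temp_cat temp out) := by unfold Spec_temp_cat; infer_instance

-- ===== CLAIM (what is proved, stated in full; the proofs are below) =====
def Claim_equal_temp_cat : Prop := ∀ (temp : Int), Dom_temp_cat temp → Spec_temp_cat temp (temp_cat temp)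

-- ===== LEMMAS AND PROOFS =====

-- ===== VERDICT (by name: the statement is the Claim_ definition above) =====
-- one unfolding step of the binary search, then full evaluation on the concrete boundary list
lemma bisect_eval (x : Int) :
    bisectRight pvBoundaries x 0 4 =
      if x < -20 then 0 else if x < 0 then 1 else if x < 15 then 2 else if x < 25 then 3 else 4 := by
  rw [bisectRight.eq_def]; norm_num [pvBoundaries]
  by_cases h15 : x < 15
  · simp only [if_pos h15]
    rw [bisectRight.eq_def]; norm_num
    by_cases h0 : x < 0
    · simp only [if_pos h0]
      rw [bisectRight.eq_def]; norm_num
      by_cases hm : x < -20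
      · simp only [if_pos hm]
        rw [bisectRight.eq_def]; norm_num
        try simp [hm, h0, h15]
        try (split_ifs <;> omega)
      · simp only [if_neg hm]
        rw [bisectRight.eq_def]; norm_num
        try simp [hm, h0, h15]
        try (split_ifs <;> omega)
    · simp only [if_neg h0]
      rw [bisectRight.eq_def]; norm_num
      try simp [h0, h15]
      try (split_ifs <;> omega)
      try omega
  · simp only [if_neg h15]
    rw [bisectRight.eq_def]; norm_num
    by_cases h25 : x < 25
    · simp only [if_pos h25]
      rw [bisectRight.eq_def]; norm_num
      try simp [h15, h25]
      try (split_ifs <;> omega)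
    · simp only [if_neg h25]
      rw [bisectRight.eq_def]; norm_num
      try simp [h15, h25]
      try (split_ifs <;> omega)

theorem temp_cat_spec : Claim_equal_temp_cat := by
  intro temp _
  unfold Spec_temp_cat temp_cat temp_cat_alt
  have hb : (pvBoundaries.length : Nat) = 4 := by decide
  rw [hb, bisect_eval]
  rw [show List.range pvA.length = [0, 1, 2] from by decide]
  simp only [tcLoop, pvA]
  norm_num
  split_ifs <;> first | omega | (simp only [Option.getD_some]; try omega)
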